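-- pv_equiv track=rewrite | github.com/Oushesh/CODING_INTERVIEW | interviewing.io/GoogleEngineer_meetingHourOptimisation.py | optimizeMeetings
-- ===== SOURCE A (Python) =====
-- def optimizeMeetings(meetings,haveHours):
--     '''
--     meetings: each meeting is a dict of dicts
--     '''
--     output_meetings = []
--     sorted_meetings = sorted(meetings,key = lambda a:a['hours'],reverse=True)
--     print (sorted_meetings)
--     sum = 0
--     for meeting in sorted_meetings:
--         sum +=meeting['hours']
--         if sum <= haveHours:
--             output_meetings.append(meeting)
--     return output_meetings
-- ===== SOURCE B (Python) =====
-- def optimizeMeetings(meetings, haveHours):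
--     sorted_meetings = sorted(meetings, key=lambda a: a['hours'], reverse=True)
--     print(sorted_meetings)
--
--     def go(ms, remaining):
--         if not ms:
--             return []
--         rem = remaining - ms[0]['hours']
--         tail = go(ms[1:], rem)
--         return [ms[0]] + tail if rem >= 0 else tail
--
--     return go(sorted_meetings, haveHours)
-- ===== Notes on version B (the rewrite author's own statement) =====
-- stated objective: alternative
-- what changed: Replaces A's fused iterative loop (running sum accumulator plus append) by a recursion over the sorted list that threads a decreasing remaining budget (haveHours minus hours consumed) and builds the result by consing; the sort and print side effect are kept.
import Mathlib
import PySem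

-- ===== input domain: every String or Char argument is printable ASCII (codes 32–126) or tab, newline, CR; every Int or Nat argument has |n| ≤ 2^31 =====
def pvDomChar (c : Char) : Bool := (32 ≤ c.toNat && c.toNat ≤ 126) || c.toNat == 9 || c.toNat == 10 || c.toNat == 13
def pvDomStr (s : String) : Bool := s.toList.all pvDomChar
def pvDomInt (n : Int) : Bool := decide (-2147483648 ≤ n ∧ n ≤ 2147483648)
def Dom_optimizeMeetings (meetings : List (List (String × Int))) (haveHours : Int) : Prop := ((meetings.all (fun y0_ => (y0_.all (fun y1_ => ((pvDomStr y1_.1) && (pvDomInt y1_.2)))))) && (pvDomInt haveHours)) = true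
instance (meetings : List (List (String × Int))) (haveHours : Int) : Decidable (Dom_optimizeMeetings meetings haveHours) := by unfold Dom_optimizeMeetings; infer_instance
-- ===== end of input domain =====

-- B replaces A's fused running-sum-and-append loop by a recursion threading a remaining budget (alternative
-- decomposition, same cost); Python A's print(sorted_meetings) side effect is kept in B and not modeled here
-- (the equivalence is about the return value only).

-- ===== PORT A =====
-- meeting['hours']: first-match association-list lookup (the dict convention); the default 0 is never
-- reached under Pre_optimizeMeetings, which requires every meeting to carry the key "hours".
def pvHoursOf (m : List (String × Int)) : Int :=
  ((m.find? (fun p => p.1 == "hours")).map (·.2)).getD 0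

def optimizeMeetings (meetings : List (List (String × Int))) (haveHours : Int) : List (List (String × Int)) :=
  let sorted_meetings := PySem.List.sorted meetings (fun a => pvHoursOf a) true
  -- print(sorted_meetings) : side effect only, no return value
  (sorted_meetings.foldl
    (fun (st : Int × List (List (String × Int))) meeting =>
      let s := st.1 + pvHoursOf meeting
      (s, if s ≤ haveHours then st.2 ++ [meeting] else st.2))
    (0, [])).2

-- ===== PORT B =====
def pvGo (ms : List (List (String × Int))) (remaining : Int) : List (List (String × Int)) :=
  match ms with
  | [] => []
  | m :: rest =>
    let rem := remaining - pvHoursOf m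
    let tail := pvGo rest rem
    if 0 ≤ rem then m :: tail else tail

def optimizeMeetings_alt (meetings : List (List (String × Int))) (haveHours : Int) : List (List (String × Int)) :=
  let sorted_meetings := PySem.List.sorted meetings (fun a => pvHoursOf a) true
  -- print(sorted_meetings) : side effect only
  pvGo sorted_meetings haveHours

-- ===== PRECONDITION & SPEC =====
-- Pre_ excludes exactly the inputs where Python A raises KeyError: a meeting without the key "hours".
def Pre_optimizeMeetings (meetings : List (List (String × Int))) (haveHours : Int) : Prop :=
  (meetings.all (fun m => m.any (fun p => p.1 == "hours"))) = true
instance (meetings : List (List (String × Int))) (haveHours : Int) : Decidable (Pre_optimizeMeetings meetings haveHours) := by unfold Pre_optimizeMeetings; infer_instance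

def pvWitness_optimizeMeetings : (List (List (String × Int))) × Int :=
  ([[("hours", 2), ("name", 0)], [("hours", 1)]], 3)

def Spec_optimizeMeetings (meetings : List (List (String × Int))) (haveHours : Int) (out : List (List (String × Int))) : Prop := out = optimizeMeetings_alt meetings haveHours
instance (meetings : List (List (String × Int))) (haveHours : Int) (out : List (List (String × Int))) : Decidable (Spec_optimizeMeetings meetings haveHours out) := by unfold Spec_optimizeMeetings; infer_instance

-- ===== CLAIM (what is proved, stated in full; the proofs are below) =====
def Claim_equal_optimizeMeetings : Prop := ∀ (meetings : List (List (String × Int))) (haveHours : Int), Dom_optimizeMeetings meetings haveHours → Pre_optimizeMeetings meetings haveHours → Spec_optimizeMeetings meetings haveHours (optimizeMeetings meetings haveHours)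

-- ===== LEMMAS AND PROOFS =====
-- Loop invariant: A's fold from running sum σ and accumulator acc produces acc ++ B's recursion with
-- remaining budget H - σ (the tests 'σ + h ≤ H' and '0 ≤ (H - σ) - h' coincide).
theorem pvLoop_eq (H : Int) (s : List (List (String × Int))) :
    ∀ (σ : Int) (acc : List (List (String × Int))),
      (s.foldl
        (fun (st : Int × List (List (String × Int))) meeting =>
          let t := st.1 + pvHoursOf meeting
          (t, if t ≤ H then st.2 ++ [meeting] else st.2))
        (σ, acc)).2 = acc ++ pvGo s (H - σ) := by
  induction s with
  | nil => intro σ acc; simp [pvGo]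
  | cons m rest ih =>
    intro σ acc
    simp only [List.foldl_cons, pvGo]
    have hiff : (σ + pvHoursOf m ≤ H) ↔ (0 ≤ H - σ - pvHoursOf m) := by omega
    by_cases h : σ + pvHoursOf m ≤ H
    · rw [if_pos h, ih (σ + pvHoursOf m) (acc ++ [m])]
      rw [if_pos (hiff.mp h)]
      have : H - (σ + pvHoursOf m) = H - σ - pvHoursOf m := by omega
      simp [this]
    · rw [if_neg h, ih (σ + pvHoursOf m) acc]
      rw [if_neg (fun hc => h (hiff.mpr hc))]
      have : H - (σ + pvHoursOf m) = H - σ - pvHoursOf m := by omega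
      simp [this]

-- ===== VERDICT (by name: the statement is the Claim_ definition above) =====
theorem optimizeMeetings_spec : Claim_equal_optimizeMeetings := by
  intro meetings haveHours _ _
  unfold Spec_optimizeMeetings optimizeMeetings optimizeMeetings_alt
  rw [pvLoop_eq haveHours _ 0 []]
  simp
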